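-- pv_equiv track=rewrite | github.com/garymaus-hirejourne/signalhire-email-enrichment | test_enhanced_processing.py | extract_multi_values
-- ===== SOURCE A (Python) =====
-- def extract_multi_values(field):
--     """Extract multiple values from semicolon or comma separated field"""
--     if not field:
--         return []
--
--     # Split by semicolon first, then comma
--     values = []
--     for item in field.split(';'):
--         for subitem in item.split(','):
--             clean_item = subitem.strip()
--             if clean_item:
--                 values.append(clean_item)
--
--     return values
-- ===== SOURCE B (Python) =====
-- def extract_multi_values(field):
--     """Extract multiple values from semicolon or comma separated field"""
--     if not field:
--         return []
--     # single character-by-character scan: accumulate the current token,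
--     # flush it (stripped, if non-empty) whenever a delimiter is seen
--     values = []
--     cur = []
--     for ch in field:
--         if ch in ';,':
--             tok = ''.join(cur).strip()
--             if tok:
--                 values.append(tok)
--             cur = []
--         else:
--             cur.append(ch)
--     tok = ''.join(cur).strip()
--     if tok:
--         values.append(tok)
--     return values
-- ===== Notes on version B (the rewrite author's own statement) =====
-- stated objective: alternative
-- what changed: B replaces A's split-then-split tokenization (build substring lists with str.split, then strip each piece) by a single character-by-character state-machine scan that accumulates the current token and flushes it at each delimiter.
import Mathlib
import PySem

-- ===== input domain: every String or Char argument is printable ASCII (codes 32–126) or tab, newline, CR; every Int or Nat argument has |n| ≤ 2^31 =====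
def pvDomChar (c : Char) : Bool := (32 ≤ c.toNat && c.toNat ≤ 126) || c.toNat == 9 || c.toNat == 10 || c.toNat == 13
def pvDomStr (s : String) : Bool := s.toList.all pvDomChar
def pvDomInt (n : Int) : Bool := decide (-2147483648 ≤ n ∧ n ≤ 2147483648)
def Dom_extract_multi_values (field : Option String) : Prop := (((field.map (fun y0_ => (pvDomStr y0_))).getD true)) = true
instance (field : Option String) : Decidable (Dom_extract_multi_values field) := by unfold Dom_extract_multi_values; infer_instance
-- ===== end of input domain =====

-- B replaces A's nested split-then-split tokenization by a single character-by-character scan with a token accumulator flushed at each delimiter (objective: alternative).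


-- ===== PORT A =====
-- Literal port of A: `if not field: return []`, then nested for-loops over split(';') and split(',')
-- with strip and conditional append to the accumulator `values`.  s.split(sep) with the nonempty
-- literal separator never raises, so `(split? …).getD []` is exact.
def extract_multi_values (field : Option String) : List String :=
  match field with
  | none => []
  | some s =>
    if s = "" then []
    else
      ((PySem.Str.split? s ";").getD []).foldl (fun values item =>
        ((PySem.Str.split? item ",").getD []).foldl (fun values subitem =>
          let clean_item := PySem.Str.strip subitem
          if clean_item ≠ "" then values ++ [clean_item] else values) values) []

-- ===== PORT B =====
-- Source B's loop body: on a delimiter flush the stripped current token (if non-empty), else append the char.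
def emvStep (st : List String × List Char) (ch : Char) : List String × List Char :=
  if ch = ';' ∨ ch = ',' then
    let tok := PySem.Str.strip (String.ofList st.2)
    (if tok ≠ "" then st.1 ++ [tok] else st.1, [])
  else (st.1, st.2 ++ [ch])

-- Literal port of B: same falsy guard, then one char-by-char scan over the string with
-- (values, cur) state, followed by the final flush of the last token.
def extract_multi_values_alt (field : Option String) : List String :=
  match field with
  | none => []
  | some s =>
    if s = "" then []
    else
      let st := s.toList.foldl emvStep ([], [])
      let tok := PySem.Str.strip (String.ofList st.2)
      if tok ≠ "" then st.1 ++ [tok] else st.1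

-- ===== PRECONDITION & SPEC =====
def Spec_extract_multi_values (field : Option String) (out : List String) : Prop := out = extract_multi_values_alt field
instance (field : Option String) (out : List String) : Decidable (Spec_extract_multi_values field out) := by unfold Spec_extract_multi_values; infer_instance

-- ===== CLAIM (what is proved, stated in full; the proofs are below) =====
def Claim_equal_extract_multi_values : Prop := ∀ (field : Option String), Dom_extract_multi_values field → Spec_extract_multi_values field (extract_multi_values field)

-- ===== LEMMAS AND PROOFS =====

-- reference single-character splitter
def splitc (d : Char) : List Char → List (List Char)
  | [] => [[]]
  | c :: rest =>
    if c = d then [] :: splitc d rest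
    else
      match splitc d rest with
      | t :: ts => (c :: t) :: ts
      | [] => [[c]]

lemma splitc_ne_nil (d : Char) (l : List Char) : splitc d l ≠ [] := by
  cases l with
  | nil => simp [splitc]
  | cons c rest =>
    simp only [splitc]
    split_ifs
    · simp
    · cases h : splitc d rest <;> simp

lemma splitc_head_cons (d c : Char) (t : List Char) (ts : List (List Char))
    (h : splitc d l = t :: ts) (hc : c ≠ d) : splitc d (c :: l) = (c :: t) :: ts := by
  simp [splitc, hc, h]

-- go-spec: PySem.Chars.splitOn.go with enough fuel computes acc.reverse ++ (head-prepended splitc)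
lemma splitOn_go_spec (d : Char) (fuel : Nat) :
    ∀ (l cur : List Char) (acc : List (List Char)), l.length < fuel →
      PySem.Chars.splitOn.go [d] fuel l cur acc =
        acc.reverse ++
          (match splitc d l with
           | t :: ts => (cur.reverse ++ t) :: ts
           | [] => [cur.reverse]) := by
  induction fuel with
  | zero => intro l cur acc h; omega
  | succ n ih =>
    intro l cur acc h
    cases l with
    | nil => simp [PySem.Chars.splitOn.go, splitc]
    | cons c rest =>
      simp only [PySem.Chars.splitOn.go]
      by_cases hc : c = d
      · subst hc
        have hpre : [c].isPrefixOf (c :: rest) = true := by simp [List.isPrefixOf]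
        rw [if_pos hpre]
        simp only [List.length_cons, List.length_nil, Nat.zero_add, List.drop_succ_cons, List.drop_zero]
        simp only [List.length_cons] at h
        rw [ih rest [] (cur.reverse :: acc) (by omega)]
        simp only [splitc]
        cases hs : splitc c rest with
        | nil => exact absurd hs (splitc_ne_nil c rest)
        | cons t ts => simp
      · have hpre : [d].isPrefixOf (c :: rest) = false := by
          simp [List.isPrefixOf]
          exact fun hdc => absurd hdc.symm hc
        rw [if_neg (by simp [hpre])]
        simp only [List.length_cons] at h
        rw [ih rest (c :: cur) acc (by omega)]
        cases hs : splitc d rest with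
        | nil => exact absurd hs (splitc_ne_nil d rest)
        | cons t ts => rw [splitc_head_cons d c t ts hs hc]; simp

lemma splitOn_single (d : Char) (l : List Char) :
    PySem.Chars.splitOn l [d] = splitc d l := by
  unfold PySem.Chars.splitOn
  rw [splitOn_go_spec d (l.length + 1) l [] [] (by omega)]
  cases hs : splitc d l with
  | nil => exact absurd hs (splitc_ne_nil d l)
  | cons t ts => simp

-- split? with a nonempty one-char separator, at the String level
lemma str_split_single (s : String) (d : Char) (sep : String) (hsep : sep.toList = [d]) :
    (PySem.Str.split? s sep).getD [] = (splitc d s.toList).map String.ofList := by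
  unfold PySem.Str.split? PySem.Chars.split?
  rw [hsep]
  simp [splitOn_single]

-- the normalizing substitution ';' ↦ ','
def subSemi (c : Char) : Char := if c = ';' then ',' else c

-- distribution: splitting the normalized string on ',' = splitting on ';' then each piece on ','
lemma splitc_comma_map (l : List Char) :
    splitc ',' (l.map subSemi) = (splitc ';' l).flatMap (splitc ',') := by
  induction l with
  | nil => simp [splitc]
  | cons c rest ih =>
    by_cases hsemi : c = ';'
    · subst hsemi
      simp only [List.map_cons, subSemi, splitc]
      rw [ih]
      simp [splitc]
    · have hmap : subSemi c = c := by simp [subSemi, hsemi]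
      cases hs : splitc ';' rest with
      | nil => exact absurd hs (splitc_ne_nil ';' rest)
      | cons t ts =>
        rw [List.map_cons, hmap, splitc_head_cons ';' c t ts hs hsemi]
        by_cases hcomma : c = ','
        · subst hcomma
          simp only [splitc, List.flatMap_cons]
          rw [ih, hs]
          simp [List.flatMap_cons]
        · cases hs2 : splitc ',' (rest.map subSemi) with
          | nil => exact absurd hs2 (splitc_ne_nil ',' _)
          | cons u us =>
            rw [splitc_head_cons ',' c u us hs2 hcomma]
            rw [ih, hs] at hs2
            simp only [List.flatMap_cons] at hs2 ⊢
            cases hu : splitc ',' t with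
            | nil => exact absurd hu (splitc_ne_nil ',' t)
            | cons v vs =>
              rw [splitc_head_cons ',' c v vs hu hcomma]
              rw [hu] at hs2
              simp only [List.cons_append] at hs2
              obtain ⟨h1, h2⟩ := List.cons.injEq .. ▸ hs2
              simp_all

-- two-delimiter splitter: what B's scan tokenizes by
def splitd : List Char → List (List Char)
  | [] => [[]]
  | c :: rest =>
    if c = ';' ∨ c = ',' then [] :: splitd rest
    else
      match splitd rest with
      | t :: ts => (c :: t) :: ts
      | [] => [[c]]

lemma splitd_ne_nil (l : List Char) : splitd l ≠ [] := by
  cases l with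
  | nil => simp [splitd]
  | cons c rest =>
    simp only [splitd]
    split_ifs
    · simp
    · cases h : splitd rest <;> simp

lemma splitd_eq_map (l : List Char) :
    splitd l = splitc ',' (l.map subSemi) := by
  induction l with
  | nil => simp [splitd, splitc]
  | cons c rest ih =>
    by_cases hd : c = ';' ∨ c = ','
    · have hsub : subSemi c = ',' := by
        rcases hd with h | h <;> simp [subSemi, h]
      simp only [splitd, List.map_cons, hsub]
      rw [if_pos hd, ih]
      simp [splitc]
    · have hc1 : c ≠ ';' := fun h => hd (Or.inl h)
      have hc2 : c ≠ ',' := fun h => hd (Or.inr h)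
      have hsub : subSemi c = c := by simp [subSemi, hc1]
      simp only [splitd, List.map_cons, hsub]
      rw [if_neg hd]
      cases hs : splitd rest with
      | nil => exact absurd hs (splitd_ne_nil rest)
      | cons t ts =>
        rw [hs] at ih
        rw [splitc_head_cons ',' c t ts ih.symm hc2]

-- invariant of B's scan: fold + final flush = done values ++ map/filter over the pending splitd
lemma emv_scan (l : List Char) :
    ∀ (values : List String) (cur : List Char),
      (let st := l.foldl emvStep (values, cur)
       let tok := PySem.Str.strip (String.ofList st.2)
       if tok ≠ "" then st.1 ++ [tok] else st.1) =
      values ++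
        ((match splitd l with
          | t :: ts => (cur ++ t) :: ts
          | [] => [cur]).map (fun cs => PySem.Str.strip (String.ofList cs))).filter
          (fun t => t ≠ "") := by
  induction l with
  | nil =>
    intro values cur
    simp only [List.foldl_nil, splitd, List.map_cons, List.map_nil, List.filter]
    split_ifs with h <;> simp_all
  | cons c rest ih =>
    intro values cur
    by_cases hd : c = ';' ∨ c = ','
    · simp only [List.foldl_cons, emvStep, if_pos hd]
      rw [ih]
      simp only [splitd, if_pos hd]
      cases hs : splitd rest with
      | nil => exact absurd hs (splitd_ne_nil rest)
      | cons t ts =>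
        simp only [List.append_nil, List.nil_append, List.map_cons, List.filter_cons]
        split_ifs with h <;> simp_all [List.append_assoc]
    · simp only [List.foldl_cons, emvStep, if_neg hd]
      rw [ih]
      simp only [splitd, if_neg hd]
      cases hs : splitd rest with
      | nil => exact absurd hs (splitd_ne_nil rest)
      | cons t ts => simp

lemma filter_flatMap {α β : Type} (l : List α) (f : α → List β) (p : β → Bool) :
    (l.flatMap f).filter p = l.flatMap (fun x => (f x).filter p) := by
  induction l with
  | nil => rfl
  | cons a t ih => simp [List.flatMap_cons, List.filter_append, ih]

-- the inner Python loop of A, as map-then-filter of the comma split of one item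
lemma inner_loop (item : String) (acc : List String) :
    ((PySem.Str.split? item ",").getD []).foldl (fun values subitem =>
        let clean_item := PySem.Str.strip subitem
        if clean_item ≠ "" then values ++ [clean_item] else values) acc =
      acc ++ (((PySem.Str.split? item ",").getD []).map PySem.Str.strip).filter (fun t => t ≠ "") := by
  have := PySem.List.foldl_append_if (fun x => decide (PySem.Str.strip x ≠ "")) PySem.Str.strip
    ((PySem.Str.split? item ",").getD []) acc
  simpa [List.filter_map, Function.comp] using this

theorem extract_multi_values_equal (field : Option String) :
    extract_multi_values field = extract_multi_values_alt field := by
  cases field with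
  | none => rfl
  | some s =>
    unfold extract_multi_values extract_multi_values_alt
    by_cases hs : s = ""
    · simp [hs]
    · simp only [if_neg hs]
      -- A: rewrite the inner loop, then the outer loop
      have houter : (fun (values : List String) (item : String) =>
          ((PySem.Str.split? item ",").getD []).foldl (fun values subitem =>
            let clean_item := PySem.Str.strip subitem
            if clean_item ≠ "" then values ++ [clean_item] else values) values) =
          (fun values item => values ++
            ((((PySem.Str.split? item ",").getD []).map PySem.Str.strip).filter (fun t => t ≠ ""))) := by
        funext values item; exact inner_loop item values
      rw [houter, PySem.List.foldl_append_eq_flatMap]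
      rw [str_split_single s ';' ";" (by decide)]
      -- B: scan invariant, then splitd → splitc ',' ∘ normalize → flatMap of the two splits
      rw [emv_scan s.toList [] []]
      rw [splitd_eq_map, splitc_comma_map]
      have hne : (splitc ';' s.toList).flatMap (splitc ',') ≠ [] := by
        rw [← splitc_comma_map]; exact splitc_ne_nil ',' _
      obtain ⟨t, ts, hsp⟩ := List.exists_cons_of_ne_nil hne
      simp only [hsp, List.nil_append]
      rw [← hsp, List.map_flatMap, filter_flatMap, List.flatMap_map]
      congr 1
      funext cs
      rw [str_split_single _ ',' "," (by decide), String.toList_ofList, List.map_map]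
      rfl

-- ===== VERDICT (by name: the statement is the Claim_ definition above) =====
theorem extract_multi_values_spec : Claim_equal_extract_multi_values := by
  intro field _
  exact extract_multi_values_equal field
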